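-- pv_equiv track=rewrite | github.com/DaehwanKimLab/seqwho | seqwho_modules.py | build_posidx
-- ===== SOURCE A (Python) =====
-- from itertools import islice, product
--
-- def build_posidx(k, nts = 'ACGT'):
--     perm   = product(nts, repeat=k)
--     nt2num = {}
--     for i in range(len(nts)):
--         nt2num[nts[i]] = i
--
--     def pat2num(nt):
--         if len(nt) == 0:
--             return 0
--
--         val = len(nts) * pat2num(nt[:-1]) + nt2num[nt[-1]]
--         return val
--
--     posidx = {}
--     for muts in perm:
--         mut = ''.join(muts)
--         num = pat2num(mut)
--         posidx[mut] = num
--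
--     return posidx
-- ===== SOURCE B (Python) =====
-- def build_posidx(k, nts='ACGT'):
--     # Grow the k-mer list one position at a time; the generation order is
--     # lexicographic in nts-order, so each word's rank is just an incrementing counter.
--     words = ['']
--     for _ in range(k):
--         words = [w + c for w in words for c in nts]
--     posidx = {}
--     i = 0
--     for w in words:
--         posidx[w] = i
--         i += 1
--     return posidx
-- ===== Notes on version B (the rewrite author's own statement) =====
-- stated objective: alternative
-- what changed: B drops the per-word recursive pat2num re-evaluation and the nt2num digit table entirely: it grows the word list one position at a time (which is exactly lexicographic product order) and assigns each word an incrementing counter as its index.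
import Mathlib
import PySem

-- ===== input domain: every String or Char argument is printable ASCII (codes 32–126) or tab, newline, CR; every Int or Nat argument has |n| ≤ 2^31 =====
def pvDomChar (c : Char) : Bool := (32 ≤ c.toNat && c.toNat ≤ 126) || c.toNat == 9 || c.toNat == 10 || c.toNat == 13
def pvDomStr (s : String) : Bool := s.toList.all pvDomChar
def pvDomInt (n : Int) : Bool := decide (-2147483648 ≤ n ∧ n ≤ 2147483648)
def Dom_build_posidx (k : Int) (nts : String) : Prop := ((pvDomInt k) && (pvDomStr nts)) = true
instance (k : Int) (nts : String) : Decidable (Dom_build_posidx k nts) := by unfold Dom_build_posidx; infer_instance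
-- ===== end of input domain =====

-- B replaces A's per-word recursive base-N evaluation (pat2num + nt2num table) by growing the
-- k-mer list one position at a time and assigning each word an incrementing counter as its index.


-- ===== PORT A =====
-- itertools.product(nts, repeat=k): tuples in lexicographic order, leftmost coordinate slowest
-- (hand-ported, exact for k ≥ 0; for k < 0 Python raises ValueError — excluded by Pre_).
def pvProdA (cs : List Char) : Nat → List (List Char)
  | 0 => [[]]
  | n + 1 => cs.flatMap (fun c => (pvProdA cs n).map (fun t => c :: t))

-- pat2num; nt[:-1] = dropLast and nt[-1] = getLast (exact: nt ≠ [] in that branch); the lookup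
-- nt2num[nt[-1]] is only reached on characters of nts, where the key is present, so getD's
-- default is never used.
def pvPat2num (nlen : Int) (m : PySem.Dict Char Int) (nt : List Char) : Int :=
  if h : nt = [] then 0
  else nlen * pvPat2num nlen m nt.dropLast + m.getD (nt.getLast h) 0
termination_by nt.length
decreasing_by
  have hp : 0 < nt.length := List.length_pos_iff.mpr h
  simp [List.length_dropLast]; omega

def build_posidx (k : Int) (nts : String) : List (String × Int) :=
  let cs := nts.toList
  let perm := pvProdA cs k.toNat
  -- nts[i] with i in range(len(nts)) is always in range, so pyGetD's default is never used
  let nt2num : PySem.Dict Char Int :=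
    (PySem.List.pyRange 0 (PySem.Str.len nts) 1).foldl
      (fun d i => d.insert (PySem.List.pyGetD cs i ' ') i) PySem.Dict.empty
  -- posidx loop; ''.join(muts) over a tuple of characters = String.ofList
  (perm.foldl (fun d w => d.insert (String.ofList w)
      (pvPat2num (PySem.Str.len nts) nt2num w)) PySem.Dict.empty).items

-- ===== PORT B =====
-- one pass of B's comprehension: words = [w + c for w in words for c in nts]
def pvStep (cs : List Char) (ws : List (List Char)) : List (List Char) :=
  ws.flatMap (fun w => cs.map (fun c => w ++ [c]))

def build_posidx_alt (k : Int) (nts : String) : List (String × Int) :=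
  let cs := nts.toList
  let words := (List.range k.toNat).foldl (fun ws _ => pvStep cs ws) [[]]
  -- 'posidx = {}; i = 0; for w in words: posidx[w] = i; i += 1'; the words (strings) are
  -- modelled as List Char in the loop and converted by String.ofList at dict-building time
  ((words.foldl (fun acc w => (acc.1.insert (String.ofList w) acc.2, acc.2 + 1))
      ((PySem.Dict.empty : PySem.Dict String Int), (0 : Int))).1).items

-- ===== PRECONDITION & SPEC =====
-- Pre_ excludes only k < 0, where A raises ValueError (itertools.product with negative repeat).
def Pre_build_posidx (k : Int) (nts : String) : Prop := 0 ≤ k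
instance (k : Int) (nts : String) : Decidable (Pre_build_posidx k nts) := by
  unfold Pre_build_posidx; infer_instance
def pvWitness_build_posidx : Int × String := (2, "ACGT")

def Spec_build_posidx (k : Int) (nts : String) (out : List (String × Int)) : Prop :=
  out = build_posidx_alt k nts
instance (k : Int) (nts : String) (out : List (String × Int)) :
    Decidable (Spec_build_posidx k nts out) := by unfold Spec_build_posidx; infer_instance

-- ===== CLAIM (what is proved, stated in full; the proofs are below) =====
def Claim_equal_build_posidx : Prop := ∀ (k : Int) (nts : String), Dom_build_posidx k nts →
  Pre_build_posidx k nts → Spec_build_posidx k nts (build_posidx k nts)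
-- ===== LEMMAS AND PROOFS =====

def pvLastIdx {α : Type} [DecidableEq α] (l : List α) (x : α) : Option Nat :=
  match l with
  | [] => none
  | a :: t =>
    match pvLastIdx t x with
    | some j => some (j + 1)
    | none => if a = x then some 0 else none


theorem pvLastIdx_eq_none_iff {α : Type} [DecidableEq α] (l : List α) (x : α) :
    pvLastIdx l x = none ↔ x ∉ l := by
  induction l with
  | nil => simp [pvLastIdx]
  | cons a t ih =>
    cases h : pvLastIdx t x with
    | some j =>
      simp only [pvLastIdx, h]
      constructor
      · intro hc; exact absurd hc (by simp)
      · intro hc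
        exact absurd (ih.mpr (fun hx => hc (List.mem_cons_of_mem _ hx))) (by simp [h])
    | none =>
      simp only [pvLastIdx, h]
      have hxt : x ∉ t := ih.mp h
      by_cases hax : a = x <;> simp [hax, hxt]
      exact fun h => hax h.symm

theorem pvLastIdx_append {α : Type} [DecidableEq α] (l1 l2 : List α) (x : α) :
    pvLastIdx (l1 ++ l2) x =
      match pvLastIdx l2 x with
      | some j => some (l1.length + j)
      | none => pvLastIdx l1 x := by
  induction l1 with
  | nil => cases h : pvLastIdx l2 x <;> simp [h, pvLastIdx]
  | cons a t ih =>
    cases h : pvLastIdx l2 x with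
    | some j =>
      simp only [List.cons_append, pvLastIdx, ih, h]
      simp [Nat.add_assoc, Nat.add_comm 1 j]
    | none =>
      simp only [List.cons_append, pvLastIdx, ih, h]

theorem pvLastIdx_map_snoc (cs : List Char) (v w : List Char) (c : Char) :
    pvLastIdx (cs.map (fun d => v ++ [d])) (w ++ [c]) =
      if v = w then pvLastIdx cs c else none := by
  induction cs with
  | nil => simp [pvLastIdx]
  | cons d ds ih =>
    simp only [List.map_cons, pvLastIdx, ih]
    by_cases hvw : v = w
    · subst hvw
      cases h : pvLastIdx ds c with
      | some j => simp
      | none => simp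
    · simp [hvw]

theorem pvLastIdx_step (cs : List Char) (ws : List (List Char)) (w : List Char) (c : Char) :
    pvLastIdx (pvStep cs ws) (w ++ [c]) =
      match pvLastIdx ws w, pvLastIdx cs c with
      | some a, some b => some (a * cs.length + b)
      | _, _ => none := by
  induction ws with
  | nil =>
    cases h : pvLastIdx cs c <;> simp [pvStep, pvLastIdx]
  | cons v rest ih =>
    have hstep : pvStep cs (v :: rest) = cs.map (fun d => v ++ [d]) ++ pvStep cs rest := by
      simp [pvStep]
    rw [hstep, pvLastIdx_append]
    cases h1 : pvLastIdx rest w with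
    | some a =>
      cases h2 : pvLastIdx cs c with
      | some b =>
        rw [ih]
        simp only [h1, h2, pvLastIdx, List.length_map]
        congr 1
        ring
      | none =>
        rw [ih]
        simp only [h1, h2, pvLastIdx]
        rw [pvLastIdx_map_snoc]
        by_cases hvw : v = w <;> simp [hvw, h2]
    | none =>
      rw [ih]
      simp only [h1, pvLastIdx_map_snoc, pvLastIdx]
      by_cases hvw : v = w
      · subst hvw
        cases h2 : pvLastIdx cs c <;> simp
      · cases h2 : pvLastIdx cs c <;> simp [hvw]

theorem pvComm (cs : List Char) (ws : List (List Char)) :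
    pvStep cs (cs.flatMap (fun c => ws.map (fun t => c :: t)))
      = cs.flatMap (fun c => (pvStep cs ws).map (fun t => c :: t)) := by
  simp only [pvStep, List.flatMap_assoc, List.flatMap_map, List.map_flatMap, List.map_map]
  rfl

theorem pvProdA_succ (cs : List Char) (n : Nat) :
    pvProdA cs (n + 1) = pvStep cs (pvProdA cs n) := by
  induction n with
  | zero =>
    show List.flatMap (fun c => [[c]]) cs = pvStep cs [[]]
    simp only [pvStep, List.flatMap_cons, List.flatMap_nil, List.append_nil]
    exact Eq.symm List.map_eq_flatMap
  | succ n ih =>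
    calc pvProdA cs (n + 2)
        = cs.flatMap (fun c => (pvStep cs (pvProdA cs n)).map (fun t => c :: t)) := by
          rw [show pvProdA cs (n + 2)
              = cs.flatMap (fun c => (pvProdA cs (n + 1)).map (fun t => c :: t)) from rfl, ih]
      _ = pvStep cs (cs.flatMap (fun c => (pvProdA cs n).map (fun t => c :: t))) :=
          (pvComm cs (pvProdA cs n)).symm
      _ = pvStep cs (pvProdA cs (n + 1)) := rfl

theorem pvWordsB (cs : List Char) (n : Nat) :
    (List.range n).foldl (fun ws _ => pvStep cs ws) [[]] = pvProdA cs n := by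
  induction n with
  | zero => simp [pvProdA]
  | succ n ih =>
    rw [List.range_succ, List.foldl_append, ih, pvProdA_succ]
    rfl


theorem pvPat2num_snoc (nlen : Int) (m : PySem.Dict Char Int) (w : List Char) (c : Char) :
    pvPat2num nlen m (w ++ [c]) = nlen * pvPat2num nlen m w + m.getD c 0 := by
  rw [pvPat2num]
  simp

theorem pvGet?_foldl_insert_key {α κ ν : Type} [BEq κ] [LawfulBEq κ] [DecidableEq κ] [DecidableEq α]
    (g : α → κ) (hg : Function.Injective g) (f : α → ν) (l : List α)
    (d : PySem.Dict κ ν) (u : α) :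
    (l.foldl (fun d w => d.insert (g w) (f w)) d).get? (g u) =
      if u ∈ l then some (f u) else d.get? (g u) := by
  induction l generalizing d with
  | nil => simp
  | cons a t ih =>
    rw [List.foldl_cons, ih]
    by_cases hut : u ∈ t
    · simp [hut]
    · by_cases hua : u = a
      · subst hua
        simp [hut, PySem.Dict.get?_insert_self]
      · have : g u ≠ g a := fun h => hua (hg h)
        simp [hut, hua, PySem.Dict.get?_insert_of_ne _ _ this]

theorem pvGet?_foldl_insert_enum {α κ : Type} [BEq κ] [LawfulBEq κ] [DecidableEq κ] [DecidableEq α]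
    (g : α → κ) (hg : Function.Injective g) (l : List α) (s : Int)
    (d : PySem.Dict κ Int) (u : α) :
    ((PySem.List.enumerate l s).foldl (fun d p => d.insert (g p.2) p.1) d).get? (g u) =
      match pvLastIdx l u with
      | some j => some (s + j)
      | none => d.get? (g u) := by
  induction l generalizing s d with
  | nil => simp [pvLastIdx, PySem.List.enumerate_nil]
  | cons a t ih =>
    rw [PySem.List.enumerate_cons, List.foldl_cons, ih]
    cases h : pvLastIdx t u with
    | some j =>
      simp only [pvLastIdx, h]
      congr 1
      push_cast
      ring
    | none =>
      simp only [pvLastIdx, h]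
      by_cases hau : a = u
      · subst hau
        simp [PySem.Dict.get?_insert_self]
      · have : g u ≠ g a := fun hh => hau (hg hh).symm
        simp [hau, PySem.Dict.get?_insert_of_ne _ _ this]

theorem pvCore (cs : List Char) (m : PySem.Dict Char Int)
    (hm : ∀ (c : Char) (b : Nat), pvLastIdx cs c = some b → m.getD c 0 = (b : Int)) :
    ∀ (n : Nat) (u : List Char), u ∈ pvProdA cs n →
      ∃ j : Nat, pvLastIdx (pvProdA cs n) u = some j ∧
        (j : Int) = pvPat2num (cs.length : Int) m u := by
  intro n
  induction n with
  | zero =>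
    intro u hu
    simp only [pvProdA, List.mem_singleton] at hu
    subst hu
    refine ⟨0, ?_, by simp [pvPat2num]⟩
    show pvLastIdx [[]] ([] : List Char) = some 0
    simp [pvLastIdx]
  | succ n ih =>
    intro u hu
    rw [pvProdA_succ] at hu ⊢
    simp only [pvStep, List.mem_flatMap, List.mem_map] at hu
    obtain ⟨w, hw, c, hc, rfl⟩ := hu
    obtain ⟨a, ha, hav⟩ := ih w hw
    obtain ⟨b, hb⟩ : ∃ b, pvLastIdx cs c = some b := by
      cases h : pvLastIdx cs c with
      | some b => exact ⟨b, rfl⟩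
      | none => exact absurd hc ((pvLastIdx_eq_none_iff cs c).mp h)
    refine ⟨a * cs.length + b, ?_, ?_⟩
    · rw [pvLastIdx_step, ha, hb]
    · rw [pvPat2num_snoc, ← hav, hm c b hb]
      push_cast
      ring

theorem pvCounterFold (g : List Char → String) (l : List (List Char))
    (d : PySem.Dict String Int) (s : Int) :
    (l.foldl (fun acc w => (acc.1.insert (g w) acc.2, acc.2 + 1)) (d, s)).1
      = (PySem.List.enumerate l s).foldl (fun d p => d.insert (g p.2) p.1) d := by
  induction l generalizing d s with
  | nil => simp
  | cons a t ih =>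
    rw [List.foldl_cons, PySem.List.enumerate_cons, List.foldl_cons]
    exact ih (d.insert (g a) s) (s + 1)

theorem pvMain (k : Int) (nts : String) : build_posidx k nts = build_posidx_alt k nts := by
  unfold build_posidx build_posidx_alt
  dsimp only
  have hinj : Function.Injective String.ofList := fun a b h => by
    have := congrArg String.toList h; simpa using this
  set cs := nts.toList with hcs
  rw [pvWordsB]
  rw [pvCounterFold String.ofList]
  have hlen : PySem.Str.len nts = (cs.length : Int) := by
    rw [hcs]; simp [PySem.Str.len_eq]
  have hnt2 : (PySem.List.pyRange 0 (PySem.Str.len nts) 1).foldl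
      (fun d i => d.insert (PySem.List.pyGetD cs i ' ') i) PySem.Dict.empty
      = (PySem.List.enumerate cs 0).foldl
          (fun d p => d.insert p.2 p.1) PySem.Dict.empty := by
    rw [PySem.List.enumerate_eq_map_pyRange (d := ' '), List.foldl_map]
    rw [hlen]
    simp [PySem.List.len_eq]
  rw [hnt2, hlen]
  set nt2 : PySem.Dict Char Int := (PySem.List.enumerate cs 0).foldl
      (fun d p => d.insert p.2 p.1) PySem.Dict.empty with hnt2def
  have hm : ∀ (c : Char) (b : Nat), pvLastIdx cs c = some b → nt2.getD c 0 = (b : Int) := by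
    intro c b hcb
    rw [PySem.Dict.getD_eq_get?_getD]
    have h := pvGet?_foldl_insert_enum (g := (id : Char → Char)) (fun _ _ h => h)
      cs 0 PySem.Dict.empty c
    rw [hcb] at h
    simp only [id] at h
    rw [hnt2def, h]
    simp
  set W := pvProdA cs k.toNat with hW
  set N : Int := (cs.length : Int) with hN
  have core := pvCore cs nt2 hm k.toNat
  have hndA : ((W.foldl (fun d w => d.insert (String.ofList w)
      (pvPat2num N nt2 w)) PySem.Dict.empty)).keys.Nodup :=
    PySem.Dict.nodup_keys_foldl_insert_key W String.ofList _ _ (by simp)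
  have hndB : (((PySem.List.enumerate W 0).foldl
      (fun d p => d.insert (String.ofList p.2) p.1) PySem.Dict.empty)).keys.Nodup :=
    PySem.Dict.nodup_keys_foldl_insert_key _ (fun p : Int × List Char => String.ofList p.2) _ _ (by simp)
  rw [PySem.Dict.items_eq_map_keys _ hndA 0, PySem.Dict.items_eq_map_keys _ hndB 0]
  have hkeysA : ((W.foldl (fun d w => d.insert (String.ofList w)
      (pvPat2num N nt2 w)) PySem.Dict.empty)).keys
      = PySem.Set.update [] (W.map String.ofList) := by
    rw [PySem.Dict.keys_foldl_insert_key]; simp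
  have hmap : (PySem.List.enumerate W 0).map (fun p => String.ofList p.2)
      = W.map String.ofList := by
    rw [show (fun p : Int × List Char => String.ofList p.2)
        = String.ofList ∘ (fun p : Int × List Char => p.2) from rfl,
      ← List.map_map, PySem.List.map_snd_enumerate]
  have hkeysB : (((PySem.List.enumerate W 0).foldl
      (fun d p => d.insert (String.ofList p.2) p.1) PySem.Dict.empty)).keys
      = PySem.Set.update [] (W.map String.ofList) := by
    rw [PySem.Dict.keys_foldl_insert_key, hmap]; simp
  rw [hkeysA, hkeysB]
  apply List.map_congr_left
  intro x hx
  have hx' : x ∈ W.map String.ofList := by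
    have := (PySem.Set.mem_update [] (W.map String.ofList) _).mp hx
    simpa using this
  obtain ⟨u, hu, rfl⟩ := List.mem_map.mp hx'
  obtain ⟨j, hj, hjv⟩ := core u hu
  congr 1
  rw [PySem.Dict.getD_eq_get?_getD, PySem.Dict.getD_eq_get?_getD]
  rw [pvGet?_foldl_insert_key String.ofList hinj _ W PySem.Dict.empty u]
  rw [pvGet?_foldl_insert_enum String.ofList hinj W 0 PySem.Dict.empty u]
  rw [hj]
  simp [hu, hjv, hN]

-- ===== VERDICT (by name: the statement is the Claim_ definition above) =====
theorem build_posidx_spec : Claim_equal_build_posidx := by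
  intro k nts _ _
  unfold Spec_build_posidx
  exact pvMain k nts
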